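-- pv_equiv track=rewrite | github.com/Jaeuk-Shin/UrbanNav-Dataset-Dashboard | dash_visualizers/filter_timeline.py | _mask_to_regions
-- ===== SOURCE A (Python) =====
-- def _mask_to_regions(mask: list[bool]) -> list[tuple[int, int, bool]]:
--     """Convert a boolean mask to contiguous (start, end, value) regions."""
--     if not mask:
--         return []
--     regions = []
--     start = 0
--     val = mask[0]
--     for i in range(1, len(mask)):
--         if mask[i] != val:
--             regions.append((start, i - 1, val))
--             start = i
--             val = mask[i]
--     regions.append((start, len(mask) - 1, val))
--     return regions
-- ===== SOURCE B (Python) =====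
-- def _mask_to_regions(mask: list[bool]) -> list[tuple[int, int, bool]]:
--     """Convert a boolean mask to contiguous (start, end, value) regions.
--
--     Staged, stateless construction: first collect the transition points
--     (index, new value) by zipping the mask with itself shifted by one,
--     then pair every region start with the next transition index (or the
--     mask length) via zip to produce the regions.
--     """
--     if not mask:
--         return []
--     cuts = [(i + 1, b) for i, (a, b) in enumerate(zip(mask, mask[1:])) if a != b]
--     starts = [(0, mask[0])] + cuts
--     ends = [i for i, _ in cuts] + [len(mask)]
--     return [(s, e - 1, v) for (s, v), e in zip(starts, ends)]
-- ===== Notes on version B (the rewrite author's own statement) =====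
-- stated objective: alternative
-- what changed: Replaces A's stateful single pass (accumulator tracking start/val, appending at each transition) with a stateless staged construction: compute the transition points by zipping the mask with its shift, then build the regions by zipping each region start with the next transition index.
import Mathlib
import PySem

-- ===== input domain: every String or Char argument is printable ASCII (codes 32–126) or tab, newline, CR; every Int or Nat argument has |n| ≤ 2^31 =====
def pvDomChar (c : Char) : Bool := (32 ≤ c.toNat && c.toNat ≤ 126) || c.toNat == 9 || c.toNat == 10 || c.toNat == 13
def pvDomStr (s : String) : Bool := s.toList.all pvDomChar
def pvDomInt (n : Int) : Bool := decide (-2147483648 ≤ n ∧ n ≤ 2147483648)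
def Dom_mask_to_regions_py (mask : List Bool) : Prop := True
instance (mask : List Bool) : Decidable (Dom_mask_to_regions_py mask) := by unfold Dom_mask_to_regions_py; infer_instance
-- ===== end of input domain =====

-- B replaces A's stateful transition-tracking loop with a stateless staged construction:
-- collect transition points by zipping the mask with its shift, then zip region starts
-- with next-transition indices; alternative decomposition, same cost.

-- ===== PORT A =====
def mask_to_regions_py (mask : List Bool) : List (Int × Int × Bool) :=
  if mask = [] then []
  else
    let n : Int := (mask.length : Int)
    let r := (PySem.List.pyRange 1 n 1).foldl
      (fun (st : List (Int × Int × Bool) × Int × Bool) i =>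
        let mi := PySem.List.pyGetD mask i false
        if mi ≠ st.2.2 then (st.1 ++ [(st.2.1, i - 1, st.2.2)], i, mi) else st)
      ([], 0, PySem.List.pyGetD mask 0 false)
    r.1 ++ [(r.2.1, n - 1, r.2.2)]

-- ===== PORT B =====
-- cuts = [(i+1, b) for i, (a, b) in enumerate(zip(mask, mask[1:])) if a != b];
-- starts = [(0, mask[0])] + cuts; ends = [i for i, _ in cuts] + [len(mask)];
-- regions = [(s, e-1, v) for (s, v), e in zip(starts, ends)]
def mask_to_regions_py_alt (mask : List Bool) : List (Int × Int × Bool) :=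
  if mask = [] then []
  else
    let cuts := ((PySem.List.enumerate (mask.zip mask.tail) 0).filter
        (fun p => p.2.1 != p.2.2)).map (fun p => (p.1 + 1, p.2.2))
    let starts := (0, PySem.List.pyGetD mask 0 false) :: cuts
    let ends := (cuts.map Prod.fst) ++ [(mask.length : Int)]
    (starts.zip ends).map (fun p => (p.1.1, p.2 - 1, p.1.2))

-- ===== PRECONDITION & SPEC =====
def Spec_mask_to_regions_py (mask : List Bool) (out : List (Int × Int × Bool)) : Prop := out = mask_to_regions_py_alt mask
instance (mask : List Bool) (out : List (Int × Int × Bool)) : Decidable (Spec_mask_to_regions_py mask out) := by unfold Spec_mask_to_regions_py; infer_instance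

-- ===== CLAIM (what is proved, stated in full; the proofs are below) =====
def Claim_equal_mask_to_regions_py : Prop := ∀ (mask : List Bool), Dom_mask_to_regions_py mask → Spec_mask_to_regions_py mask (mask_to_regions_py mask)

-- ===== LEMMAS AND PROOFS =====

-- reference recursion: regions of val :: xs where val's run began at start and xs starts at index i
def pvReg (i start : Int) (val : Bool) : List Bool → List (Int × Int × Bool)
  | [] => [(start, i - 1, val)]
  | x :: xs => if x ≠ val then (start, i - 1, val) :: pvReg (i + 1) i x xs
               else pvReg (i + 1) start val xs

-- transition points (index, new value) of xs, first element of xs at index i, previous value val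
def pvCuts (i : Int) (val : Bool) : List Bool → List (Int × Bool)
  | [] => []
  | x :: xs => if x ≠ val then (i, x) :: pvCuts (i + 1) x xs else pvCuts (i + 1) x xs

-- A's loop body as a function of the (index, element) pair
def pvStep (st : List (Int × Int × Bool) × Int × Bool) (p : Int × Bool) :
    List (Int × Int × Bool) × Int × Bool :=
  if p.2 ≠ st.2.2 then (st.1 ++ [(st.2.1, p.1 - 1, st.2.2)], p.1, p.2) else st

-- A's fold (plus the final append) computes pvReg
theorem pvA_reg (xs : List Bool) (acc : List (Int × Int × Bool)) (start : Int) (val : Bool)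
    (i : Int) :
    ((PySem.List.enumerate xs i).foldl pvStep (acc, start, val)).1
      ++ [(((PySem.List.enumerate xs i).foldl pvStep (acc, start, val)).2.1,
           i + (xs.length : Int) - 1,
           ((PySem.List.enumerate xs i).foldl pvStep (acc, start, val)).2.2)]
    = acc ++ pvReg i start val xs := by
  induction xs generalizing acc start val i with
  | nil => simp [PySem.List.enumerate_nil, pvReg]
  | cons x xs ih =>
    rw [PySem.List.enumerate_cons, List.foldl_cons,
      show i + ((x :: xs).length : Int) - 1 = (i + 1) + (xs.length : Int) - 1 by
        push_cast [List.length_cons]; ring]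
    by_cases hx : x = val
    · have hst : pvStep (acc, start, val) (i, x) = (acc, start, val) := by
        simp [pvStep, hx]
      rw [hst, pvReg, if_neg (by simpa using hx)]
      exact ih acc start val (i + 1)
    · have hst : pvStep (acc, start, val) (i, x)
          = (acc ++ [(start, i - 1, val)], i, x) := by simp [pvStep, hx]
      rw [hst, pvReg, if_pos hx,
        ih (acc ++ [(start, i - 1, val)]) i x (i + 1), List.append_assoc]
      rfl

-- B's filtered-enumerate transition list computes pvCuts
theorem pvB_cuts (xs : List Bool) (val : Bool) (c : Int) :
    ((PySem.List.enumerate ((val :: xs).zip xs) c).filter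
        (fun p => p.2.1 != p.2.2)).map (fun p => (p.1 + 1, p.2.2))
      = pvCuts (c + 1) val xs := by
  induction xs generalizing val c with
  | nil => simp [PySem.List.enumerate_nil, pvCuts]
  | cons x xs ih =>
    rw [show (val :: x :: xs).zip (x :: xs) = (val, x) :: (x :: xs).zip xs from rfl,
      PySem.List.enumerate_cons, pvCuts]
    by_cases hx : x = val
    · subst hx
      rw [if_neg (by simp), List.filter_cons, if_neg (by simp)]
      exact ih x (c + 1)
    · have hb : (val != x) = true := by simp [bne, Ne.symm hx]
      rw [if_pos hx, List.filter_cons, if_pos hb, List.map_cons, ih x (c + 1)]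

-- zipping starts with next-transition indices over pvCuts computes pvReg
theorem pvB_reg (xs : List Bool) (i s : Int) (v : Bool) :
    (((s, v) :: pvCuts i v xs).zip
        (((pvCuts i v xs).map Prod.fst) ++ [i + (xs.length : Int)])).map
      (fun p => (p.1.1, p.2 - 1, p.1.2))
    = pvReg i s v xs := by
  induction xs generalizing i s v with
  | nil => simp [pvCuts, pvReg]
  | cons x xs ih =>
    rw [pvCuts, pvReg,
      show i + ((x :: xs).length : Int) = (i + 1) + (xs.length : Int) by
        push_cast [List.length_cons]; ring]
    by_cases hx : x = v
    · rw [if_neg (by simpa using hx), if_neg (by simpa using hx)]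
      rw [hx]
      exact ih (i + 1) s v
    · rw [if_pos hx, if_pos hx, List.map_cons, List.cons_append, List.zip_cons_cons,
        List.map_cons, ih (i + 1) i x]

-- ===== VERDICT (by name: the statement is the Claim_ definition above) =====
theorem mask_to_regions_py_spec : Claim_equal_mask_to_regions_py := by
  intro mask _
  unfold Spec_mask_to_regions_py mask_to_regions_py mask_to_regions_py_alt
  cases mask with
  | nil => simp
  | cons m0 tail =>
    simp only [if_neg (List.cons_ne_nil m0 tail)]
    -- A side: the pyRange fold is the enumerate fold of pvStep
    have hmap : (PySem.List.pyRange 1 (((m0 :: tail).length : Int)) 1).map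
        (fun j => (j, PySem.List.pyGetD (m0 :: tail) j false)) = PySem.List.enumerate tail 1 := by
      have he := PySem.List.enumerate_eq_map_pyRange (xs := m0 :: tail) (d := false)
      have hlen : PySem.List.len (m0 :: tail) = ((m0 :: tail).length : Int) := by
        simp [PySem.List.len_eq]
      rw [hlen] at he
      have hpos : (0 : Int) < ((m0 :: tail).length : Int) := by simp
      rw [PySem.List.pyRange_one_cons hpos, List.map_cons, PySem.List.enumerate_cons] at he
      exact (List.cons.injEq _ _ _ _ ▸ he).2.symm
    have hfoldl :
        (PySem.List.pyRange 1 (((m0 :: tail).length : Int)) 1).foldl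
          (fun (st : List (Int × Int × Bool) × Int × Bool) i =>
            let mi := PySem.List.pyGetD (m0 :: tail) i false
            if mi ≠ st.2.2 then (st.1 ++ [(st.2.1, i - 1, st.2.2)], i, mi) else st)
          ([], 0, PySem.List.pyGetD (m0 :: tail) 0 false)
        = (PySem.List.enumerate tail 1).foldl pvStep ([], 0, m0) := by
      rw [← hmap, List.foldl_map, PySem.List.pyGetD_zero_cons]
      rfl
    have hA := pvA_reg tail [] 0 m0 1
    rw [show (1 : Int) + (tail.length : Int) - 1
          = ((m0 :: tail).length : Int) - 1 by push_cast [List.length_cons]; ring] at hA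
    -- B side: tail of (m0 :: tail) is tail, zip shift gives pvCuts, then pvB_reg
    have hcuts := pvB_cuts tail m0 0
    norm_num at hcuts
    have hB := pvB_reg tail 1 0 m0
    rw [show (1 : Int) + (tail.length : Int)
          = (((m0 :: tail).length : Int)) by push_cast [List.length_cons]; ring] at hB
    rw [hfoldl, List.tail_cons, PySem.List.pyGetD_zero_cons, hcuts, hB]
    exact hA
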